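-- pv_equiv track=rewrite | github.com/yuantongkang/font-subset-tool | .github/scripts/process-font.py | generate_unicode_range
-- ===== SOURCE A (Python) =====
-- def generate_unicode_range(codepoints):
--     """Generate Unicode range string"""
--     if not codepoints:
--         return 'U+0000-FFFF'
--
--     ranges = []
--     start = codepoints[0]
--     end = start
--
--     for i in range(1, len(codepoints)):
--         if codepoints[i] == end + 1:
--             end = codepoints[i]
--         else:
--             if start == end:
--                 ranges.append(f"U+{start:04X}")
--             else:
--                 ranges.append(f"U+{start:04X}-{end:04X}")
--             start = codepoints[i]
--             end = start
--
--     if start == end: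
--         ranges.append(f"U+{start:04X}")
--     else:
--         ranges.append(f"U+{start:04X}-{end:04X}")
--
--     return ', '.join(ranges)
-- ===== SOURCE B (Python) =====
-- def _split_runs(xs):
--     """Maximal sublists of strictly consecutive values, built back-to-front.
--     During the scan both the list of runs and each run are kept reversed
--     (so only O(1) appends are needed); the final comprehension restores order."""
--     rev_runs = []
--     for x in reversed(xs):
--         if rev_runs and rev_runs[-1][-1] == x + 1:
--             rev_runs[-1].append(x)
--         else:
--             rev_runs.append([x])
--     return [run[::-1] for run in reversed(rev_runs)]
--
--
-- def generate_unicode_range(codepoints):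
--     """Generate Unicode range string"""
--     if not codepoints:
--         return 'U+0000-FFFF'
--     return ', '.join(
--         f"U+{run[0]:04X}" if run[0] == run[-1] else f"U+{run[0]:04X}-{run[-1]:04X}"
--         for run in _split_runs(codepoints)
--     )
-- ===== Notes on version B (the rewrite author's own statement) =====
-- stated objective: alternative
-- what changed: Replaces A's incremental start/end state machine with a two-phase pipeline: first split the list into maximal runs of consecutive values (built back-to-front), then format each run from its first and last element and join.
import Mathlib
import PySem

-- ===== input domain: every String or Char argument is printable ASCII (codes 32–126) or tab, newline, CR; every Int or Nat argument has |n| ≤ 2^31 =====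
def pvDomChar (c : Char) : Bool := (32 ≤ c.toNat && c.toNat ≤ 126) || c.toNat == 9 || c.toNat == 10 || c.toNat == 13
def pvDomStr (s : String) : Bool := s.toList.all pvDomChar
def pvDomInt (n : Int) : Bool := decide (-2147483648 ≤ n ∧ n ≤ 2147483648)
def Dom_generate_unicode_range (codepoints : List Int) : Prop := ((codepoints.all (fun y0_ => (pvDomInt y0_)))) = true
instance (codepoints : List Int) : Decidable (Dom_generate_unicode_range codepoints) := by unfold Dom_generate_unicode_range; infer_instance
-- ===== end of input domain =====

-- B replaces A's start/end state machine by splitting into maximal consecutive runs and formatting each run; alternative decomposition, same cost.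

-- Shared formatting primitives (Python's f"U+{n:04X}" etc., used verbatim by both Pythons)
def hexDigitChar (n : Nat) : Char := if n < 10 then Char.ofNat (48 + n) else Char.ofNat (55 + n)

def hexChars (n : Nat) : List Char :=
  if _h : n < 16 then [hexDigitChar n]
  else hexChars (n / 16) ++ [hexDigitChar (n % 16)]
  decreasing_by exact Nat.div_lt_self (by omega) (by omega)

-- format(n, '04X'): sign first, zero-padded to total width 4 (exact, incl. negatives)
def fmt04X (n : Int) : List Char :=
  let sign : List Char := if n < 0 then ['-'] else []
  let ds := hexChars n.natAbs
  sign ++ List.replicate (4 - (sign.length + ds.length)) '0' ++ ds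

-- the repeated append block of A (and the per-run format of B): "U+start" or "U+start-end"
def emitRange (start e : Int) : String :=
  if start = e then String.ofList ('U' :: '+' :: fmt04X start)
  else String.ofList ('U' :: '+' :: fmt04X start ++ '-' :: fmt04X e)

-- ===== PORT A =====
-- the for-loop over codepoints[1:] with state (ranges, start, end), plus the final append
def loopA (start e : Int) (ranges : List String) : List Int → List String
  | [] => ranges ++ [emitRange start e]
  | c :: rest =>
    if c = e + 1 then loopA start c ranges rest
    else loopA c c (ranges ++ [emitRange start e]) rest

def generate_unicode_range (codepoints : List Int) : String :=
  match codepoints with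
  | [] => "U+0000-FFFF"
  | x :: rest => PySem.Str.join ", " (loopA x x [] rest)

-- ===== PORT B =====
-- _split_runs: 'for x in reversed(xs)' is foldr over xs; Source B keeps rev_runs and each run
-- reversed (end-appends) and reverses both at the end, so under that representation each
-- end-append is a cons at the head and the final double reverse is the identity: the loop
-- body transcribes, branch for branch, to this structural recursion
def splitRuns : List Int → List (List Int)
  | [] => []
  | x :: xs =>
    match splitRuns xs with
    | (y :: ys) :: rs => if y = x + 1 then (x :: y :: ys) :: rs else [x] :: (y :: ys) :: rs
    | _ => [[x]]

-- f"U+{run[0]:04X}" if run[0] == run[-1] else f"U+{run[0]:04X}-{run[-1]:04X}"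
def partOfRun (run : List Int) : String := emitRange (run.headD 0) (run.getLastD 0)

def generate_unicode_range_alt (codepoints : List Int) : String :=
  match codepoints with
  | [] => "U+0000-FFFF"
  | _ :: _ => PySem.Str.join ", " ((splitRuns codepoints).map partOfRun)

-- ===== PRECONDITION & SPEC =====
def Spec_generate_unicode_range (codepoints : List Int) (out : String) : Prop := out = generate_unicode_range_alt codepoints
instance (codepoints : List Int) (out : String) : Decidable (Spec_generate_unicode_range codepoints out) := by unfold Spec_generate_unicode_range; infer_instance

-- ===== CLAIM (what is proved, stated in full; the proofs are below) =====
def Claim_equal_generate_unicode_range : Prop := ∀ (codepoints : List Int), Dom_generate_unicode_range codepoints → Spec_generate_unicode_range codepoints (generate_unicode_range codepoints)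

-- ===== LEMMAS AND PROOFS =====

-- what A's loop produces, expressed against B's run structure (proof-only helper)
def partSE (start e : Int) : List (List Int) → List String
  | (y :: ys) :: rs =>
    if y = e + 1 then emitRange start ((y :: ys).getLastD 0) :: rs.map partOfRun
    else emitRange start e :: (((y :: ys) :: rs).map partOfRun)
  | _ => [emitRange start e]

theorem loopA_acc (rest : List Int) : ∀ (start e : Int) (ranges : List String),
    loopA start e ranges rest = ranges ++ loopA start e [] rest := by
  induction rest with
  | nil => intro start e ranges; simp [loopA]
  | cons c rest ih =>
    intro start e ranges
    by_cases h : c = e + 1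
    · simp only [loopA, if_pos h]; rw [ih]
    · simp only [loopA, if_neg h]
      rw [ih, ih c c ([] ++ [emitRange start e])]
      simp

theorem loopA_eq_partSE (rest : List Int) : ∀ (start e : Int),
    loopA start e [] rest = partSE start e (splitRuns rest) := by
  induction rest with
  | nil => intro start e; simp [loopA, splitRuns, partSE]
  | cons c rest ih =>
    intro start e
    have step : loopA start e [] (c :: rest)
        = if c = e + 1 then loopA start c [] rest
          else emitRange start e :: loopA c c [] rest := by
      by_cases h : c = e + 1
      · simp [loopA, h]
      · simp only [loopA, if_neg h]
        rw [loopA_acc]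
        simp
    rw [step]
    rcases hs : splitRuns rest with _ | ⟨run, rs⟩
    · by_cases h : c = e + 1 <;>
        simp [ih, hs, splitRuns, h, partSE, partOfRun]
    · rcases run with _ | ⟨y, ys⟩
      · by_cases h : c = e + 1 <;>
          simp [ih, hs, splitRuns, h, partSE, partOfRun]
      · by_cases hy : y = c + 1
        · by_cases h : c = e + 1
          · subst h; simp [ih, hs, splitRuns, hy, partSE]
          · simp [ih, hs, splitRuns, hy, h, partSE, partOfRun]
        · by_cases h : c = e + 1
          · subst h; simp [ih, hs, splitRuns, hy, partSE, partOfRun]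
          · simp [ih, hs, splitRuns, hy, h, partSE, partOfRun]

theorem partSE_self (x : Int) (rest : List Int) :
    partSE x x (splitRuns rest) = (splitRuns (x :: rest)).map partOfRun := by
  rcases hs : splitRuns rest with _ | ⟨run, rs⟩
  · simp [splitRuns, hs, partSE, partOfRun]
  · rcases run with _ | ⟨y, ys⟩
    · simp [splitRuns, hs, partSE, partOfRun]
    · by_cases hy : y = x + 1 <;>
        simp [splitRuns, hs, partSE, hy, partOfRun]

-- ===== VERDICT (by name: the statement is the Claim_ definition above) =====
theorem generate_unicode_range_spec : Claim_equal_generate_unicode_range := by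
  intro codepoints _
  unfold Spec_generate_unicode_range
  match codepoints with
  | [] => rfl
  | x :: rest =>
    simp only [generate_unicode_range, generate_unicode_range_alt]
    rw [loopA_eq_partSE, partSE_self]
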